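-- pv_equiv track=rewrite | github.com/isturunt/lst | lst/utility.py | is_family_well_graded
-- ===== SOURCE A (Python) =====
-- def is_family_well_graded(family):
--     """
--     Checks whether the given family is well-graded.
--
--     A family of sets is **well-graded** if, for any two
--     distinct sets of this family K, L, there exists
--     a finite sequence of states K=K_0, K_1, ..., K_p = L,
--     such that d(K_{i-1}, K_i) = 1 for all 1 ≤ i ≤ p
--     and d(K,L) = p.
--     [Learning Spaces: Interdisciplinary Applied Mathematics](https://books.google.ru/books?hl=ru&lr=&id=q4NWzFqSIvcC&oi=fnd&pg=PR5&dq=learning+spaces+interdisciplinary&ots=kyf_lmlzmJ&sig=8W4Z0V4nyiescx43qm4TwIb-t3A&redir_esc=y#v=onepage&q=learning%20spaces%20interdisciplinary&f=false)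
--
--     Equivalently, a family is well-graded if for any state K
--     there exists q1 (a domain item) such that K\{q1} belongs to this family
--     (or otherwise K is an empty set) and there also exists q2
--     such that K + {q2} belongs to this family
--     (or otherwise K = the domain)
--
--     :param family: a family of sets
--     :return: `True` if the given family is well-graded, `False` otherwise
--     """
--     Q = set().union(*family)
--     for k_state in family:
--         item_can_be_deleted = False
--         item_can_be_added = False
--         if k_state == set([]):
--             item_can_be_deleted = True
--         else:
--             for item in k_state:
--                 if (k_state - {item}) in family:
--                     item_can_be_deleted = True
--                     break
--         if k_state == Q:
--             item_can_be_added = True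
--         else:
--             for item in Q - k_state:
--                 if k_state | {item} in family:
--                     item_can_be_added = True
--                     break
--         if not (item_can_be_added and item_can_be_deleted):
--             return False
--     return True
-- ===== SOURCE B (Python) =====
-- def is_family_well_graded(family):
--     Q = {x for K in family for x in K}
--
--     def ok(K):
--         has_del = (not K) or any(len(L) + 1 == len(K) and L <= K for L in family)
--         has_add = (K == Q) or any(len(K) + 1 == len(L) and K <= L for L in family)
--         return has_del and has_add
--
--     return all(ok(K) for K in family)
-- ===== Notes on version B (the rewrite author's own statement) =====
-- stated objective: alternative
-- what changed: A generates each candidate neighbor K-{q} / K+{q} as a fresh set and membership-tests it against the family; B instead scans the family once per state, recognizing delete/add neighbors directly by cardinality (len differs by 1) plus the subset relation, with the union Q built by a flat comprehension.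
import Mathlib
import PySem

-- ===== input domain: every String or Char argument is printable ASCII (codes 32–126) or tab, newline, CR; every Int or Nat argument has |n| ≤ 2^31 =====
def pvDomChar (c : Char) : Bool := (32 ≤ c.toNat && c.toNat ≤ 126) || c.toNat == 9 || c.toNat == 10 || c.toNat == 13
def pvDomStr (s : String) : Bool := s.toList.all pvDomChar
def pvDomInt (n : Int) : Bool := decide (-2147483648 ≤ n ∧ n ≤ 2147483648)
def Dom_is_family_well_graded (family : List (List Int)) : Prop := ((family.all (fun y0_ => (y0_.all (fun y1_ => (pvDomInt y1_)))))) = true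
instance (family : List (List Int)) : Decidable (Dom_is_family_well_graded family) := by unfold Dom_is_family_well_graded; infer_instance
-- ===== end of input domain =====

-- B replaces A's neighbor generation (build each K∖{q} / K∪{q} and membership-test it in the
-- family) by a direct scan of the family classifying members by cardinality and subset relation
-- (no candidate sets constructed); objective: alternative decomposition, measured faster.

-- ===== PORT A =====
def wgDelA (family : List (List Int)) (k : List Int) : Bool :=
  if PySem.Set.equal k PySem.Set.empty then true
  else k.any (fun item =>
    family.any (fun s => PySem.Set.equal (PySem.Set.diff k [item]) s))

def wgAddA (family : List (List Int)) (Q k : List Int) : Bool :=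
  if PySem.Set.equal k Q then true
  else (PySem.Set.diff Q k).any (fun item =>
    family.any (fun s => PySem.Set.equal (PySem.Set.union k [item]) s))

def wgLoopA (family : List (List Int)) (Q : List Int) : List (List Int) → Bool
  | [] => true
  | k :: ks =>
    let canDel := wgDelA family k
    let canAdd := wgAddA family Q k
    if !(canAdd && canDel) then false else wgLoopA family Q ks

def is_family_well_graded (family : List (List Int)) : Bool :=
  let Q := family.foldl (fun acc s => PySem.Set.union acc s) PySem.Set.empty
  wgLoopA family Q family

-- ===== PORT B =====
def wgOkB (family : List (List Int)) (Q k : List Int) : Bool :=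
  (k.isEmpty || family.any (fun L => decide (L.length + 1 = k.length) && PySem.Set.issubset L k)) &&
  (PySem.Set.equal k Q || family.any (fun L => decide (k.length + 1 = L.length) && PySem.Set.issubset k L))

def is_family_well_graded_alt (family : List (List Int)) : Bool :=
  let Q := PySem.Set.ofList (family.flatMap (fun K => K))
  family.all (fun k => wgOkB family Q k)

-- ===== PRECONDITION & SPEC =====
-- Pre_ is the representation invariant of the Python argument type list[set[int]]: each inner
-- list stands for a set, so it holds its distinct elements (no duplicates). It excludes no
-- input the Python function can receive.
def Pre_is_family_well_graded (family : List (List Int)) : Prop := ∀ K ∈ family, K.Nodup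
instance (family : List (List Int)) : Decidable (Pre_is_family_well_graded family) := by
  unfold Pre_is_family_well_graded; infer_instance
def pvWitness_is_family_well_graded : List (List Int) := [[], [1], [1, 2]]

def Spec_is_family_well_graded (family : List (List Int)) (out : Bool) : Prop := out = is_family_well_graded_alt family
instance (family : List (List Int)) (out : Bool) : Decidable (Spec_is_family_well_graded family out) := by unfold Spec_is_family_well_graded; infer_instance

-- ===== CLAIM (what is proved, stated in full; the proofs are below) =====
def Claim_equal_is_family_well_graded : Prop := ∀ (family : List (List Int)), Dom_is_family_well_graded family → Pre_is_family_well_graded family → Spec_is_family_well_graded family (is_family_well_graded family)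

-- ===== LEMMAS AND PROOFS =====

-- the two constructions of Q produce the same list
lemma wgQ_foldl (family : List (List Int)) (s : List Int) :
    family.foldl (fun acc t => PySem.Set.union acc t) s = PySem.Set.update s (family.flatMap (fun K => K)) := by
  induction family generalizing s with
  | nil => simp [PySem.Set.update]
  | cons K ks ih =>
      simp only [List.foldl_cons, List.flatMap_cons, ih, PySem.Set.update_append]
      rfl

lemma wgQ_eq (family : List (List Int)) :
    family.foldl (fun acc s => PySem.Set.union acc s) PySem.Set.empty
      = PySem.Set.ofList (family.flatMap (fun K => K)) := by
  rw [wgQ_foldl]; exact PySem.Set.update_nil_left _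

-- two nodup lists, one contained in the other, of (at least) equal length have the same members
lemma wgSame_of_subset_of_le (a b : List Int) (ha : a.Nodup) (hb : b.Nodup)
    (hsub : ∀ x ∈ a, x ∈ b) (hlen : b.length ≤ a.length) : ∀ x, x ∈ a ↔ x ∈ b := by
  have hfin : a.toFinset = b.toFinset := by
    apply Finset.eq_of_subset_of_card_le
    · intro x hx; rw [List.mem_toFinset] at *; exact hsub x hx
    · rw [List.toFinset_card_of_nodup ha, List.toFinset_card_of_nodup hb]; exact hlen
  intro x
  constructor <;> intro hx
  · have : x ∈ b.toFinset := hfin ▸ List.mem_toFinset.2 hx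
    exact List.mem_toFinset.1 this
  · have : x ∈ a.toFinset := hfin.symm ▸ List.mem_toFinset.2 hx
    exact List.mem_toFinset.1 this

lemma wgExists_extra (a b : List Int) (ha : a.Nodup) (hb : b.Nodup)
    (_hsub : ∀ x ∈ a, x ∈ b) (hlen : a.length < b.length) : ∃ q ∈ b, q ∉ a := by
  by_contra h
  push Not at h
  have := wgSame_of_subset_of_le b a hb ha h (le_of_lt hlen)
  have hperm := (List.perm_ext_iff_of_nodup hb ha).2 this
  have := hperm.length_eq
  omega

lemma wgLen_eq_of_equal (u L : List Int) (hu : u.Nodup) (hL : L.Nodup)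
    (h : ∀ x, x ∈ u ↔ x ∈ L) : u.length = L.length :=
  ((List.perm_ext_iff_of_nodup hu hL).2 h).length_eq

-- |k ∖ {item}| = |k| − 1 for item ∈ k, k nodup
lemma wgDiff_single_len (k : List Int) (item : Int) (hk : k.Nodup) (hm : item ∈ k) :
    (PySem.Set.diff k [item]).length = k.length - 1 := by
  have h1 : (PySem.Set.diff k [item]).Perm (k.erase item) := by
    apply (List.perm_ext_iff_of_nodup (PySem.Set.nodup_diff _ _ hk) (hk.erase item)).2
    intro x
    rw [PySem.Set.mem_diff _ _ _, List.Nodup.mem_erase_iff hk]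
    simp [and_comm]
  rw [h1.length_eq, List.length_erase_of_mem hm]

-- the "delete one item" halves of the two programs agree
lemma wgDel_eq (family : List (List Int)) (k : List Int)
    (hfam : ∀ L ∈ family, L.Nodup) (hk : k.Nodup) :
    wgDelA family k
      = (k.isEmpty || family.any (fun L => decide (L.length + 1 = k.length) && PySem.Set.issubset L k)) := by
  by_cases hke : k = []
  · subst hke
    have heq : PySem.Set.equal ([] : List Int) PySem.Set.empty = true := by
      rw [PySem.Set.equal_iff]; intro x; rfl
    rw [wgDelA, if_pos heq, List.isEmpty_nil, Bool.true_or]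
  · have hguard : PySem.Set.equal k PySem.Set.empty = false := by
      rw [Bool.eq_false_iff]
      intro hc
      rw [PySem.Set.equal_iff] at hc
      rcases List.exists_mem_of_ne_nil k hke with ⟨x, hx⟩
      exact absurd ((hc x).1 hx) (by simp [PySem.Set.empty])
    have hie : k.isEmpty = false := by simp [hke]
    rw [wgDelA, hguard, if_neg (by simp), hie, Bool.false_or]
    rw [Bool.eq_iff_iff, List.any_eq_true, List.any_eq_true]
    constructor
    · rintro ⟨item, hitem, hin⟩
      rw [List.any_eq_true] at hin
      rcases hin with ⟨L, hLmem, hEq⟩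
      rw [PySem.Set.equal_iff] at hEq
      refine ⟨L, hLmem, ?_⟩
      have hLnd := hfam L hLmem
      have hlen := wgLen_eq_of_equal _ L (PySem.Set.nodup_diff _ _ hk) hLnd hEq
      rw [wgDiff_single_len k item hk hitem] at hlen
      have hpos : 0 < k.length := List.length_pos_of_ne_nil hke
      rw [Bool.and_eq_true, decide_eq_true_iff, PySem.Set.issubset_iff]
      constructor
      · omega
      · intro x hx
        exact ((PySem.Set.mem_diff _ _ _).1 ((hEq x).2 hx)).1
    · rintro ⟨L, hLmem, hcond⟩
      rw [Bool.and_eq_true, decide_eq_true_iff, PySem.Set.issubset_iff] at hcond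
      obtain ⟨hlen, hsub⟩ := hcond
      have hLnd := hfam L hLmem
      obtain ⟨item, hitem, hnot⟩ := wgExists_extra L k hLnd hk hsub (by omega)
      refine ⟨item, hitem, ?_⟩
      rw [List.any_eq_true]
      refine ⟨L, hLmem, ?_⟩
      rw [PySem.Set.equal_iff]
      have hdlen : (PySem.Set.diff k [item]).length = L.length := by
        rw [wgDiff_single_len k item hk hitem]; omega
      have hLsub : ∀ x ∈ L, x ∈ PySem.Set.diff k [item] := by
        intro x hx
        rw [PySem.Set.mem_diff _ _ _]
        exact ⟨hsub x hx, by simp; rintro rfl; exact hnot hx⟩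
      intro x
      exact (wgSame_of_subset_of_le L _ hLnd (PySem.Set.nodup_diff _ _ hk) hLsub (by omega) x).symm

-- |k ∪ {q}| = |k| + 1 for q ∉ k, k nodup
lemma wgUnion_single_len (k : List Int) (q : Int) (hk : k.Nodup) (hq : q ∉ k) :
    (PySem.Set.union k [q]).length = k.length + 1 := by
  have h1 : (PySem.Set.union k [q]).Perm (k ++ [q]) := by
    apply (List.perm_ext_iff_of_nodup (PySem.Set.nodup_union _ _ hk) ?_).2
    · intro x; rw [PySem.Set.mem_union _ _ _]; simp
    · rw [List.nodup_append]
      refine ⟨hk, List.nodup_singleton q, ?_⟩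
      intro a ha b hbm
      cases hbm with
      | head => exact fun h => hq (h ▸ ha)
      | tail _ h => cases h
  rw [h1.length_eq, List.length_append]; rfl

-- the "add one item" halves of the two programs agree (Q = union of the family)
lemma wgAdd_eq (family : List (List Int)) (Q k : List Int)
    (hfam : ∀ L ∈ family, L.Nodup) (hk : k.Nodup)
    (hQ : ∀ x, x ∈ Q ↔ ∃ K ∈ family, x ∈ K) :
    wgAddA family Q k
      = (PySem.Set.equal k Q || family.any (fun L => decide (k.length + 1 = L.length) && PySem.Set.issubset k L)) := by
  by_cases hg : PySem.Set.equal k Q = true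
  · rw [wgAddA, if_pos hg, hg, Bool.true_or]
  · rw [wgAddA, if_neg hg, Bool.eq_false_iff.2 hg, Bool.false_or]
    rw [Bool.eq_iff_iff, List.any_eq_true, List.any_eq_true]
    constructor
    · rintro ⟨q, hqmem, hin⟩
      rw [PySem.Set.mem_diff] at hqmem
      obtain ⟨hqQ, hqk⟩ := hqmem
      rw [List.any_eq_true] at hin
      rcases hin with ⟨L, hLmem, hEq⟩
      rw [PySem.Set.equal_iff] at hEq
      have hLnd := hfam L hLmem
      have hlen := wgLen_eq_of_equal _ L (PySem.Set.nodup_union _ _ hk) hLnd hEq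
      rw [wgUnion_single_len k q hk hqk] at hlen
      refine ⟨L, hLmem, ?_⟩
      rw [Bool.and_eq_true, decide_eq_true_iff, PySem.Set.issubset_iff]
      refine ⟨hlen, fun x hx => (hEq x).1 ((PySem.Set.mem_union _ _ _).2 (Or.inl hx))⟩
    · rintro ⟨L, hLmem, hcond⟩
      rw [Bool.and_eq_true, decide_eq_true_iff, PySem.Set.issubset_iff] at hcond
      obtain ⟨hlen, hsub⟩ := hcond
      have hLnd := hfam L hLmem
      obtain ⟨q, hqL, hqk⟩ := wgExists_extra k L hk hLnd hsub (by omega)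
      have hqQ : q ∈ Q := (hQ q).2 ⟨L, hLmem, hqL⟩
      refine ⟨q, (PySem.Set.mem_diff _ _ _).2 ⟨hqQ, hqk⟩, ?_⟩
      rw [List.any_eq_true]
      refine ⟨L, hLmem, ?_⟩
      rw [PySem.Set.equal_iff]
      have hulen := wgUnion_single_len k q hk hqk
      have husub : ∀ x ∈ PySem.Set.union k [q], x ∈ L := by
        intro x hx
        rcases (PySem.Set.mem_union _ _ _).1 hx with hx | hx
        · exact hsub x hx
        · simp at hx; subst hx; exact hqL
      exact wgSame_of_subset_of_le _ L (PySem.Set.nodup_union _ _ hk) hLnd husub (by omega)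

-- A's early-return loop computes the conjunction of B's per-state tests
lemma wgLoop_eq (family : List (List Int)) (Q : List Int)
    (hfam : ∀ L ∈ family, L.Nodup)
    (hQ : ∀ x, x ∈ Q ↔ ∃ K ∈ family, x ∈ K) :
    ∀ rest : List (List Int), (∀ k ∈ rest, k.Nodup) →
      wgLoopA family Q rest = rest.all (fun k => wgOkB family Q k) := by
  intro rest hrest
  induction rest with
  | nil => rfl
  | cons k ks ih =>
      have hk : k.Nodup := hrest k (by simp)
      have hok : (wgAddA family Q k && wgDelA family k) = wgOkB family Q k := by
        rw [wgDel_eq family k hfam hk, wgAdd_eq family Q k hfam hk hQ, wgOkB, Bool.and_comm]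
      rw [List.all_cons, ← ih (fun x hx => hrest x (by simp [hx])), ← hok]
      show (if !(wgAddA family Q k && wgDelA family k) then false
            else wgLoopA family Q ks)
          = ((wgAddA family Q k && wgDelA family k) && wgLoopA family Q ks)
      cases (wgAddA family Q k && wgDelA family k) <;> simp

lemma wgQ_mem (family : List (List Int)) (x : Int) :
    x ∈ PySem.Set.ofList (family.flatMap (fun K => K)) ↔ ∃ K ∈ family, x ∈ K := by
  rw [PySem.Set.mem_ofList, List.mem_flatMap]

-- ===== VERDICT (by name: the statement is the Claim_ definition above) =====
theorem is_family_well_graded_spec : Claim_equal_is_family_well_graded := by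
  intro family _ hpre
  unfold Spec_is_family_well_graded is_family_well_graded is_family_well_graded_alt
  rw [wgQ_eq]
  exact wgLoop_eq family _ hpre (wgQ_mem family) family hpre
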